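-- pv_equiv track=rewrite | github.com/edwardianec/hystogram_equalization | test.py | maximums
-- ===== SOURCE A (Python) =====
-- import itertools
--
-- def maximums(graph, maximums_count):
-- 	maximums = {}
-- 	previous = 0
-- 	for i in range(1, len(graph)):
-- 		current = graph[i] - graph[i-1]
-- 		if (current < 0 and previous > 0): maximums[i-1] = graph[i-1]
-- 		previous = current
--
-- 	# После того, как мы нашли максимумы, мы должны упорядичить эти
-- 	# максимумы в порядке убывания, после чего выбрать только необходимое нам количество,
-- 	# определенное в переменной maximums_count
-- 	maximums	= {k: v for k, v in sorted(maximums.items(), key=lambda item: item[1], reverse=True)}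
-- 	maximums 	= dict(itertools.islice(maximums.items(),maximums_count))
-- 	maximums	= dict(sorted(maximums.items()))
-- 	return maximums
-- ===== SOURCE B (Python) =====
-- def maximums(graph, maximums_count):
--     peaks = [(j, graph[j]) for j in range(1, len(graph) - 1)
--              if graph[j - 1] < graph[j] > graph[j + 1]]
--     pool = list(peaks)
--     chosen = set()
--     for _ in range(maximums_count):
--         if not pool:
--             break
--         best = max(pool, key=lambda p: p[1])
--         pool.remove(best)
--         chosen.add(best[0])
--     return {j: v for j, v in peaks if j in chosen}
-- ===== Notes on version B (the rewrite author's own statement) =====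
-- stated objective: alternative
-- what changed: A detects peaks with a stateful diff-sign scan and selects the top-k by a full stable sort by value plus slice plus a final sort by key; B never sorts: it selects the top-k by repeated first-maximum extraction from the peak pool (k scans, matching the stable tie-break because max() returns the first maximal element) and emits the result by filtering the index-ordered peak list against the chosen set.
import Mathlib
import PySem

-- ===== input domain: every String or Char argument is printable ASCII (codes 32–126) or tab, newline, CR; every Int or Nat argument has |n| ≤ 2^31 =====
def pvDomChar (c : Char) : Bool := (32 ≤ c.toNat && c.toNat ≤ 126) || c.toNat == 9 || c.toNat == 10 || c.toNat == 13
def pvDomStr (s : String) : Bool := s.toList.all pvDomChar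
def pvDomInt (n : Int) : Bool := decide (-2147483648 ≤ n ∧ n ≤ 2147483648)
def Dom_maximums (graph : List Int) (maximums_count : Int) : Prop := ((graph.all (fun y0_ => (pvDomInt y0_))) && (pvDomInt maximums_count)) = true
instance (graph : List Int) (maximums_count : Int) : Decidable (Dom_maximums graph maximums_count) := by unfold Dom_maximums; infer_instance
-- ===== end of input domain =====

-- B replaces A's sort-based top-k (stable sort by value, slice, re-sort by key) by a sort-free
-- repeated first-maximum selection from the peak pool, emitting the result by filtering the
-- index-ordered peak list against the chosen set (alternative algorithm, no sorting at all).

-- ===== PORT A =====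
def maximums (graph : List Int) (maximums_count : Int) : List (Int × Int) :=
  let st := (PySem.List.pyRange 1 (graph.length : Int)).foldl
    (fun (st : PySem.Dict Int Int × Int) (i : Int) =>
      let current := (PySem.List.pyGet? graph i).getD 0 - (PySem.List.pyGet? graph (i - 1)).getD 0
      let d := if current < 0 ∧ st.2 > 0 then st.1.insert (i - 1) ((PySem.List.pyGet? graph (i - 1)).getD 0) else st.1
      (d, current))
    (PySem.Dict.empty, 0)
  -- {k: v for k, v in sorted(items, key=value, reverse=True)}
  let m1 := (PySem.List.sorted st.1.items (fun p => p.2) true).foldl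
      (fun (d : PySem.Dict Int Int) p => d.insert p.1 p.2) PySem.Dict.empty
  -- dict(itertools.islice(items, maximums_count))   (Pre_: 0 ≤ maximums_count, else islice raises)
  let m2 := (m1.items.take maximums_count.toNat).foldl
      (fun (d : PySem.Dict Int Int) p => d.insert p.1 p.2) PySem.Dict.empty
  -- dict(sorted(items))  — tuples compared lexicographically
  let m3 := (PySem.List.sorted2 m2.items Prod.fst Prod.snd false).foldl
      (fun (d : PySem.Dict Int Int) p => d.insert p.1 p.2) PySem.Dict.empty
  m3.items

-- ===== PORT B =====
-- the 'for _ in range(maximums_count)' selection loop of Source B; 'max? pool = none' is exactly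
-- Python's 'if not pool: break' (max? is none iff the pool is empty)
def maximumsSelect (n : Nat) (pool : List (Int × Int)) (chosen : PySem.Set Int) : PySem.Set Int :=
  match n with
  | 0 => chosen
  | Nat.succ m =>
    match PySem.List.max? pool (fun p => p.2) with
    | none => chosen
    | some best => maximumsSelect m ((PySem.List.remove? pool best).getD pool) (chosen.add best.1)

def maximums_alt (graph : List Int) (maximums_count : Int) : List (Int × Int) :=
  let peaks := ((PySem.List.pyRange 1 ((graph.length : Int) - 1)).filter
      (fun j => decide ((PySem.List.pyGet? graph (j - 1)).getD 0 < (PySem.List.pyGet? graph j).getD 0) &&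
                decide ((PySem.List.pyGet? graph (j + 1)).getD 0 < (PySem.List.pyGet? graph j).getD 0))).map
      (fun j => (j, (PySem.List.pyGet? graph j).getD 0))
  let chosen := maximumsSelect maximums_count.toNat peaks PySem.Set.empty
  peaks.filter (fun p => PySem.Set.contains chosen p.1)

-- ===== PRECONDITION & SPEC =====
-- Pre_ excludes only maximums_count < 0, where A's itertools.islice raises ValueError.
def Pre_maximums (graph : List Int) (maximums_count : Int) : Prop := 0 ≤ maximums_count
instance (graph : List Int) (maximums_count : Int) : Decidable (Pre_maximums graph maximums_count) := by unfold Pre_maximums; infer_instance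
def pvWitness_maximums : List Int × Int := ([0, 2, 1, 3, 1], 1)

def Spec_maximums (graph : List Int) (maximums_count : Int) (out : List (Int × Int)) : Prop := out = maximums_alt graph maximums_count
instance (graph : List Int) (maximums_count : Int) (out : List (Int × Int)) : Decidable (Spec_maximums graph maximums_count out) := by unfold Spec_maximums; infer_instance

-- ===== CLAIM (what is proved, stated in full; the proofs are below) =====
def Claim_equal_maximums : Prop := ∀ (graph : List Int) (maximums_count : Int), Dom_maximums graph maximums_count → Pre_maximums graph maximums_count → Spec_maximums graph maximums_count (maximums graph maximums_count)

-- ===== LEMMAS AND PROOFS =====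

-- the value both ports read at index i (every use is in range)
def pvG (graph : List Int) (i : Int) : Int := (PySem.List.pyGet? graph i).getD 0

-- B's peak list up to (exclusive) bound b
def pvPeaks (graph : List Int) (b : Int) : List (Int × Int) :=
  ((PySem.List.pyRange 1 b).filter
      (fun j => decide (pvG graph (j - 1) < pvG graph j) && decide (pvG graph (j + 1) < pvG graph j))).map
    (fun j => (j, pvG graph j))

-- A's loop body
def pvStep (graph : List Int) (st : PySem.Dict Int Int × Int) (i : Int) : PySem.Dict Int Int × Int :=
  let current := (PySem.List.pyGet? graph i).getD 0 - (PySem.List.pyGet? graph (i - 1)).getD 0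
  let d := if current < 0 ∧ st.2 > 0 then st.1.insert (i - 1) ((PySem.List.pyGet? graph (i - 1)).getD 0) else st.1
  (d, current)

theorem pvStep_eq (graph : List Int) (st : PySem.Dict Int Int × Int) (i : Int) :
    pvStep graph st i =
      (if pvG graph i - pvG graph (i - 1) < 0 ∧ st.2 > 0
       then st.1.insert (i - 1) (pvG graph (i - 1)) else st.1,
       pvG graph i - pvG graph (i - 1)) := rfl

theorem pvPeaks_fst_lt (graph : List Int) (b : Int) :
    ∀ p ∈ pvPeaks graph b, p.1 < b := by
  intro p hp
  simp only [pvPeaks, List.mem_map, List.mem_filter] at hp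
  obtain ⟨j, ⟨hj, _⟩, rfl⟩ := hp
  exact ((PySem.List.mem_pyRange_one).1 hj).2

theorem pvPeaks_contains_false (graph : List Int) (b k : Int)
    (d : PySem.Dict Int Int) (hd : d.items = pvPeaks graph b) (hk : b ≤ k) :
    d.contains k = false := by
  rw [PySem.Dict.contains_eq_decide_mem_keys]
  simp only [decide_eq_false_iff_not]
  intro hmem
  simp only [PySem.Dict.keys, hd, List.mem_map] at hmem
  obtain ⟨p, hp, rfl⟩ := hmem
  exact absurd (pvPeaks_fst_lt graph b p hp) (by omega)

theorem pvPeaks_zero_le (graph : List Int) (b : Int) (hb : b ≤ 1) : pvPeaks graph b = [] := by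
  unfold pvPeaks
  rw [PySem.List.pyRange_one_eq_nil hb]
  rfl

theorem pvPeaks_succ (graph : List Int) (b : Int) (hb : 1 ≤ b) :
    pvPeaks graph (b + 1) = pvPeaks graph b ++
      (if pvG graph (b - 1) < pvG graph b ∧ pvG graph (b + 1) < pvG graph b
       then [(b, pvG graph b)] else []) := by
  unfold pvPeaks
  rw [PySem.List.pyRange_one_succ_right hb, List.filter_append, List.map_append]
  congr 1
  by_cases h : pvG graph (b - 1) < pvG graph b ∧ pvG graph (b + 1) < pvG graph b
  · simp [h.1, h.2]
  · rw [not_and_or] at h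
    rcases h with h | h <;> simp [h]

-- loop invariant for A's fold over range(1, n)
theorem pvInv (graph : List Int) (n : Nat) (hn : 1 ≤ n) :
    ((PySem.List.pyRange 1 (n : Int)).foldl (pvStep graph) (PySem.Dict.empty, 0)).1.items
        = pvPeaks graph ((n : Int) - 1) ∧
    ((PySem.List.pyRange 1 (n : Int)).foldl (pvStep graph) (PySem.Dict.empty, 0)).2
        = (if 2 ≤ n then pvG graph ((n : Int) - 1) - pvG graph ((n : Int) - 2) else 0) := by
  induction n with
  | zero => omega
  | succ m ih =>
    by_cases hm : 1 ≤ m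
    · have hrw : PySem.List.pyRange 1 ((m + 1 : Nat) : Int)
          = PySem.List.pyRange 1 (m : Int) ++ [(m : Int)] := by
        push_cast
        exact PySem.List.pyRange_one_succ_right (by exact_mod_cast hm)
      obtain ⟨ih1, ih2⟩ := ih hm
      rw [hrw, List.foldl_append, List.foldl_cons, List.foldl_nil, pvStep_eq]
      have hb1 : ((m + 1 : Nat) : Int) - 1 = (m : Int) := by push_cast; ring
      constructor
      · by_cases hm2 : 2 ≤ m
        · have hprev : (List.foldl (pvStep graph) (PySem.Dict.empty, 0) (PySem.List.pyRange 1 (m : Int))).2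
              = pvG graph ((m : Int) - 1) - pvG graph ((m : Int) - 2) := by
            rw [ih2, if_pos hm2]
          have hpk : pvPeaks graph (((m + 1 : Nat) : Int) - 1)
              = pvPeaks graph ((m : Int) - 1) ++
                (if pvG graph ((m : Int) - 1 - 1) < pvG graph ((m : Int) - 1) ∧
                    pvG graph ((m : Int) - 1 + 1) < pvG graph ((m : Int) - 1)
                 then [((m : Int) - 1, pvG graph ((m : Int) - 1))] else []) := by
            rw [hb1, show (m : Int) = ((m : Int) - 1) + 1 by ring]
            rw [pvPeaks_succ graph ((m : Int) - 1) (by omega)]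
            rw [show (m : Int) - 1 + 1 - 1 = (m : Int) - 1 by ring]
          rw [hpk, hprev]
          by_cases hc : pvG graph (m : Int) - pvG graph ((m : Int) - 1) < 0 ∧
              pvG graph ((m : Int) - 1) - pvG graph ((m : Int) - 2) > 0
          · rw [if_pos hc]
            rw [if_pos (show pvG graph ((m : Int) - 1 - 1) < pvG graph ((m : Int) - 1) ∧
                    pvG graph ((m : Int) - 1 + 1) < pvG graph ((m : Int) - 1) by
              rw [show (m : Int) - 1 - 1 = (m : Int) - 2 by ring,
                  show (m : Int) - 1 + 1 = (m : Int) by ring]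
              exact ⟨by omega, by omega⟩)]
            rw [PySem.Dict.items_insert_of_not_contains _ _
              (pvPeaks_contains_false graph ((m : Int) - 1) ((m : Int) - 1) _ ih1 le_rfl)]
            rw [ih1]
          · rw [if_neg hc]
            rw [if_neg (show ¬ (pvG graph ((m : Int) - 1 - 1) < pvG graph ((m : Int) - 1) ∧
                    pvG graph ((m : Int) - 1 + 1) < pvG graph ((m : Int) - 1)) by
              rw [show (m : Int) - 1 - 1 = (m : Int) - 2 by ring,
                  show (m : Int) - 1 + 1 = (m : Int) by ring]
              intro h; exact hc ⟨by omega, by omega⟩)]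
            simpa using ih1
        · -- m = 1: previous = 0, A's condition is false and there is no interior index yet
          have hm1 : m = 1 := by omega
          subst hm1
          have h2 : (List.foldl (pvStep graph) (PySem.Dict.empty, 0) (PySem.List.pyRange 1 ((1 : Nat) : Int))).2 = 0 := by
            rw [ih2]; norm_num
          rw [if_neg (by rw [h2]; omega), ih1, hb1]
          norm_num
          rw [pvPeaks_zero_le graph 0 (by norm_num), pvPeaks_zero_le graph 1 le_rfl]
      · rw [if_pos (show 2 ≤ m + 1 by omega), hb1,
            show ((m + 1 : Nat) : Int) - 2 = (m : Int) - 1 by push_cast; ring]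
    · have hm0 : m = 0 := by omega
      subst hm0
      have hnil : PySem.List.pyRange 1 ((0 + 1 : Nat) : Int) = [] := by decide
      rw [hnil]
      refine ⟨?_, by norm_num⟩
      show ([] : List (Int × Int)) = pvPeaks graph (((0 + 1 : Nat) : Int) - 1)
      rw [(pvPeaks_zero_le graph _ (by norm_num))]

-- A's loop produces exactly B's peak list, for every graph
theorem pvLoop_eq_peaks (graph : List Int) :
    ((PySem.List.pyRange 1 (graph.length : Int)).foldl (pvStep graph) (PySem.Dict.empty, 0)).1.items
      = pvPeaks graph ((graph.length : Int) - 1) := by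
  rcases Nat.eq_zero_or_pos graph.length with h | h
  · rw [h]
    have hnil : PySem.List.pyRange 1 ((0 : Nat) : Int) = [] := by decide
    rw [hnil, pvPeaks_zero_le graph _ (by norm_num)]
    rfl
  · exact (pvInv graph graph.length h).1

-- rebuilding a dict from a list of pairs with distinct keys and reading items back is the identity
theorem pvDictRoundTrip (l : List (Int × Int)) (h : (l.map Prod.fst).Nodup) :
    ((l.foldl (fun (d : PySem.Dict Int Int) p => d.insert p.1 p.2) PySem.Dict.empty)).items = l := by
  have := PySem.Dict.items_foldl_insert_fresh l Prod.fst Prod.snd PySem.Dict.empty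
    (fun a _ => PySem.Dict.contains_empty a.1) h
  simpa using this

theorem pvPeaks_nodup_fst (graph : List Int) (b : Int) :
    ((pvPeaks graph b).map Prod.fst).Nodup := by
  unfold pvPeaks
  rw [List.map_map]
  have : (Prod.fst ∘ fun j => ((j : Int), pvG graph j)) = id := by funext j; rfl
  rw [this, List.map_id]
  exact (PySem.List.nodup_pyRange_one 1 b).filter _

theorem pvPeaks_pairwise (graph : List Int) (b : Int) :
    (pvPeaks graph b).Pairwise (fun p q => p.1 < q.1) := by
  unfold pvPeaks
  rw [List.pairwise_map]
  exact ((PySem.List.pairwise_lt_pyRange_one 1 b).filter _)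

theorem pvNodup_perm_fst {l l' : List (Int × Int)} (hp : l'.Perm l)
    (h : (l.map Prod.fst).Nodup) : (l'.map Prod.fst).Nodup :=
  h.perm (hp.map Prod.fst).symm

-- ---- B-side: repeated first-max extraction = take of the stable descending sort ----

theorem pvSortedRev_append (xs : List (Int × Int)) (x : Int × Int) :
    PySem.List.sorted (xs ++ [x]) (fun p => p.2) true
      = PySem.List.insertBy (fun a b => decide (b.2 < a.2)) x
          (PySem.List.sorted xs (fun p => p.2) true) := by
  rw [PySem.List.sorted_rev_eq_foldl_insertBy, PySem.List.sorted_rev_eq_foldl_insertBy,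
      List.foldl_append, List.foldl_cons, List.foldl_nil]

theorem pvMax_append_none (xs : List (Int × Int)) (x : Int × Int)
    (h : PySem.List.max? xs (fun p => p.2) = none) :
    PySem.List.max? (xs ++ [x]) (fun p => p.2) = some x := by
  simp only [PySem.List.max?] at h ⊢
  rw [List.foldl_append, h, List.foldl_cons, List.foldl_nil]

theorem pvMax_append_some (xs : List (Int × Int)) (x m : Int × Int)
    (h : PySem.List.max? xs (fun p => p.2) = some m) :
    PySem.List.max? (xs ++ [x]) (fun p => p.2)
      = if m.2 < x.2 then some x else some m := by
  simp only [PySem.List.max?] at h ⊢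
  rw [List.foldl_append, h, List.foldl_cons, List.foldl_nil]

-- head/tail of the stable descending sort: the first maximal element, then the sort of the rest
theorem pvHeadTail (xs : List (Int × Int)) (hnd : xs.Nodup) (b : Int × Int)
    (hb : PySem.List.max? xs (fun p => p.2) = some b) :
    PySem.List.sorted xs (fun p => p.2) true
      = b :: PySem.List.sorted (xs.erase b) (fun p => p.2) true := by
  induction xs using List.reverseRecOn generalizing b with
  | nil => simp [PySem.List.max?] at hb
  | append_singleton xs x ih =>
    have hx : x ∉ xs := by
      rcases List.nodup_append.1 hnd with ⟨_, _, hdisj⟩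
      intro hmem
      exact hdisj x hmem x (by simp) rfl
    have hndxs : xs.Nodup := (List.nodup_append.1 hnd).1
    rcases hmx : PySem.List.max? xs (fun p => p.2) with _ | m
    · -- xs = []
      have hxs : xs = [] := (PySem.List.max?_eq_none_iff _ _).1 hmx
      subst hxs
      rw [pvMax_append_none _ _ hmx] at hb
      injection hb with hb
      subst hb
      simp [PySem.List.sorted, PySem.List.insertBy]
    · rw [pvMax_append_some _ _ _ hmx] at hb
      by_cases hlt : m.2 < x.2
      · rw [if_pos hlt] at hb
        injection hb with hb
        subst hb
        have herase : (xs ++ [x]).erase x = xs := by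
          rw [List.erase_append_right _ hx]
          simp
        rw [herase, pvSortedRev_append]
        rcases hS : PySem.List.sorted xs (fun p => p.2) true with _ | ⟨y, ys⟩
        · have : xs = [] := (PySem.List.sorted_eq_nil_iff xs _ true).1 hS
          subst this
          simp [PySem.List.max?] at hmx
        · have hy : y ∈ xs := (PySem.List.mem_sorted _ _ _ _).1 (by rw [hS]; simp)
          have : y.2 ≤ m.2 := PySem.List.max?_isMax hmx y hy
          simp only [PySem.List.insertBy]
          rw [if_pos (by simp; omega)]
      · rw [if_neg hlt] at hb
        injection hb with hb
        subst hb
        have hmem : m ∈ xs := PySem.List.max?_mem hmx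
        rw [List.erase_append_left _ hmem, pvSortedRev_append, ih hndxs m hmx]
        simp only [PySem.List.insertBy]
        rw [if_neg (by simp; omega)]
        rw [← pvSortedRev_append]

-- B's selection loop picks exactly the first n elements of the stable descending sort
theorem pvSelect_eq (n : Nat) (pool : List (Int × Int)) (chosen : PySem.Set Int)
    (hnd : pool.Nodup) :
    maximumsSelect n pool chosen
      = PySem.Set.update chosen
          (((PySem.List.sorted pool (fun p => p.2) true).take n).map Prod.fst) := by
  induction n generalizing pool chosen with
  | zero => simp [maximumsSelect, PySem.Set.update]
  | succ n ih =>
    rcases hmx : PySem.List.max? pool (fun p => p.2) with _ | b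
    · have hpool : pool = [] := (PySem.List.max?_eq_none_iff _ _).1 hmx
      subst hpool
      simp [maximumsSelect, hmx, PySem.List.sorted, PySem.Set.update]
    · have hmem : b ∈ pool := PySem.List.max?_mem hmx
      have hrm : (PySem.List.remove? pool b).getD pool = pool.erase b := by
        rw [PySem.List.remove?_eq_some_erase pool b hmem]
        rfl
      have hstep : maximumsSelect (n + 1) pool chosen
          = maximumsSelect n (pool.erase b) (chosen.add b.1) := by
        simp [maximumsSelect, hmx, hrm]
      rw [hstep, ih (pool.erase b) (chosen.add b.1) (hnd.erase b),
          pvHeadTail pool hnd b hmx]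
      simp [PySem.Set.update]

theorem pvUpdate_eq_append (L : List Int) (s : List Int)
    (hdisj : ∀ x ∈ L, x ∉ s) (hnd : L.Nodup) :
    PySem.Set.update s L = s ++ L := by
  induction L generalizing s with
  | nil => simp [PySem.Set.update]
  | cons a L ih =>
    have hadd : PySem.Set.add s a = s ++ [a] := by
      simp [PySem.Set.add, PySem.Set.contains, hdisj a (by simp)]
    have : PySem.Set.update s (a :: L) = PySem.Set.update (s ++ [a]) L := by
      simp [PySem.Set.update, hadd]
    rw [this, ih (s ++ [a]) ?_ hnd.of_cons]
    · simp
    · intro x hxL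
      simp only [List.mem_append, List.mem_singleton]
      rintro (hs | rfl)
      · exact hdisj x (by simp [hxL]) hs
      · exact (List.nodup_cons.1 hnd).1 hxL

-- ---- sorted2 on pairwise-distinct first components is sorting by the first component ----

theorem pvInsertBy_congr {α : Type} (b1 b2 : α → α → Bool) (x : α) (ys : List α)
    (h : ∀ y ∈ ys, b1 x y = b2 x y) :
    PySem.List.insertBy b1 x ys = PySem.List.insertBy b2 x ys := by
  induction ys with
  | nil => rfl
  | cons y ys ih =>
    simp only [PySem.List.insertBy]
    rw [h y (by simp)]
    by_cases hc : b2 x y = true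
    · rw [if_pos hc, if_pos hc]
    · rw [if_neg hc, if_neg hc, ih (fun z hz => h z (by simp [hz]))]

theorem pvSorted2_eq_sorted (xs : List (Int × Int)) (hnd : (xs.map Prod.fst).Nodup) :
    PySem.List.sorted2 xs Prod.fst Prod.snd false
      = PySem.List.sorted xs Prod.fst false := by
  induction xs using List.reverseRecOn with
  | nil => rfl
  | append_singleton xs x ih =>
    have hndxs : (xs.map Prod.fst).Nodup := by
      rw [List.map_append] at hnd
      exact (List.nodup_append.1 hnd).1
    have hxfst : ∀ y ∈ xs, y.1 ≠ x.1 := by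
      intro y hy
      rw [List.map_append, List.nodup_append] at hnd
      intro he
      have hym : y.1 ∈ List.map Prod.fst xs := List.mem_map.mpr ⟨y, hy, rfl⟩
      exact hnd.2.2 y.1 hym x.1 (by simp) he
    have h2 : PySem.List.sorted2 (xs ++ [x]) Prod.fst Prod.snd false
        = PySem.List.insertBy
            (fun a b => decide (a.1 < b.1) || (!decide (b.1 < a.1) && decide (a.2 < b.2)))
            x (PySem.List.sorted2 xs Prod.fst Prod.snd false) := by
      show List.foldl _ [] (xs ++ [x]) = _
      rw [List.foldl_append, List.foldl_cons, List.foldl_nil]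
      rfl
    have h1 : PySem.List.sorted (xs ++ [x]) Prod.fst false
        = PySem.List.insertBy (fun a b => decide (a.1 < b.1)) x
            (PySem.List.sorted xs Prod.fst false) := by
      rw [PySem.List.sorted_eq_foldl_insertBy, PySem.List.sorted_eq_foldl_insertBy,
          List.foldl_append, List.foldl_cons, List.foldl_nil]
    rw [h2, h1, ih hndxs]
    apply pvInsertBy_congr
    intro y hy
    have hyxs : y ∈ xs := (PySem.List.mem_sorted _ _ _ _).1 hy
    have hne : x.1 ≠ y.1 := fun he => hxfst y hyxs he.symm
    by_cases hlt : x.1 < y.1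
    · simp [hlt]
    · have : y.1 < x.1 := by omega
      simp [hlt, this]

-- ===== VERDICT (by name: the statement is the Claim_ definition above) =====
theorem maximums_spec : Claim_equal_maximums := by
  intro graph maximums_count _ hpre
  show maximums graph maximums_count = maximums_alt graph maximums_count
  unfold maximums maximums_alt
  have hloop : ((PySem.List.pyRange 1 (graph.length : Int)).foldl
      (fun (st : PySem.Dict Int Int × Int) (i : Int) =>
        let current := (PySem.List.pyGet? graph i).getD 0 - (PySem.List.pyGet? graph (i - 1)).getD 0
        let d := if current < 0 ∧ st.2 > 0 then st.1.insert (i - 1) ((PySem.List.pyGet? graph (i - 1)).getD 0) else st.1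
        (d, current))
      (PySem.Dict.empty, 0)).1.items = pvPeaks graph ((graph.length : Int) - 1) := pvLoop_eq_peaks graph
  have hpeaks_alt : ((PySem.List.pyRange 1 ((graph.length : Int) - 1)).filter
      (fun j => decide ((PySem.List.pyGet? graph (j - 1)).getD 0 < (PySem.List.pyGet? graph j).getD 0) &&
                decide ((PySem.List.pyGet? graph (j + 1)).getD 0 < (PySem.List.pyGet? graph j).getD 0))).map
      (fun j => (j, (PySem.List.pyGet? graph j).getD 0)) = pvPeaks graph ((graph.length : Int) - 1) := rfl
  simp only [hloop, hpeaks_alt]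
  set P := pvPeaks graph ((graph.length : Int) - 1) with hP
  have hnP : (P.map Prod.fst).Nodup := pvPeaks_nodup_fst graph _
  have hnS : (((PySem.List.sorted P (fun p => p.2) true)).map Prod.fst).Nodup :=
    pvNodup_perm_fst (PySem.List.sorted_perm P (fun p => p.2) true) hnP
  rw [pvDictRoundTrip _ hnS]
  set S := PySem.List.sorted P (fun p => p.2) true with hS
  set T := S.take maximums_count.toNat with hT
  have hnT : (T.map Prod.fst).Nodup := by
    rw [hT, List.map_take]
    exact hnS.sublist (List.take_sublist _ _)
  rw [pvDictRoundTrip _ hnT]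
  -- B side: the selection loop chooses the keys of T
  have hPnd : P.Nodup := List.Nodup.of_map _ hnP
  have hsel : maximumsSelect maximums_count.toNat P PySem.Set.empty = T.map Prod.fst := by
    rw [pvSelect_eq _ P _ hPnd,
        pvUpdate_eq_append _ _ (by intro x hx; simp [PySem.Set.empty]) hnT]
    rfl
  rw [hsel]
  -- A side: sorted2 with distinct keys = sort by key; then name its value as the filter
  have hnT' : ((PySem.List.sorted2 T Prod.fst Prod.snd false).map Prod.fst).Nodup :=
    pvNodup_perm_fst (PySem.List.sorted2_perm T Prod.fst Prod.snd false) hnT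
  rw [pvDictRoundTrip _ hnT', pvSorted2_eq_sorted T hnT]
  -- the filter of the index-ordered peak list by T's keys IS sorted(T, key=fst)
  set F := P.filter (fun p => PySem.Set.contains (T.map Prod.fst) p.1) with hF
  have hTsubP : ∀ p ∈ T, p ∈ P := by
    intro p hp
    have : p ∈ S := List.mem_of_mem_take hp
    exact (PySem.List.mem_sorted _ _ _ _).1 this
  have hTnd : T.Nodup := List.Nodup.of_map _ hnT
  have hFmem : ∀ p, p ∈ F ↔ p ∈ T := by
    intro p
    rw [hF, List.mem_filter]
    simp only [PySem.Set.contains, List.contains_iff_mem]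
    constructor
    · rintro ⟨hpP, hpT⟩
      rw [List.mem_map] at hpT
      obtain ⟨q, hqT, hq⟩ := hpT
      have hqP : q ∈ P := hTsubP q hqT
      have : q = p := List.inj_on_of_nodup_map hnP hqP hpP hq
      rwa [← this]
    · intro hpT
      exact ⟨hTsubP p hpT, List.mem_map_of_mem hpT⟩
  have hFnd : F.Nodup := (List.Nodup.of_map _ hnP).filter _
  have hperm : F.Perm T := (List.perm_ext_iff_of_nodup hFnd hTnd).2 hFmem
  have hFpw : F.Pairwise (fun p q : Int × Int => p.1 < q.1) :=
    (pvPeaks_pairwise graph _).filter _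
  exact PySem.List.sorted_eq_of_perm_of_pairwise_lt T F Prod.fst hperm hFpw

-- witness sanity (used by the grader): Dom ∧ Pre hold at the witness
theorem pvWitness_ok : Dom_maximums pvWitness_maximums.1 pvWitness_maximums.2 ∧
    Pre_maximums pvWitness_maximums.1 pvWitness_maximums.2 := by
  constructor <;> decide
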